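-- pv_equiv track=rewrite | github.com/MistMezalla/Laptop-Backup | Python/CLRS/Insertion Sort.py | Ins_Sort_rec
-- ===== SOURCE A (Python) =====
-- def Ins_Sort_rec(A: list[int], p: int, r: int):
--     key = A[r]
--     j=r-1
--     while j>-1 and key < A[j]:
--         A[j+1] = A[j]
--         j -= 1
--     A[j+1] = key
--
--     return A
-- ===== SOURCE B (Python) =====
-- def Ins_Sort_rec(A: list[int], p: int, r: int):
--     key = A[r]
--     pos = next((i + 1 for i in range(r - 1, -1, -1) if A[i] <= key), 0)
--     A[pos:r + 1] = [key] + A[pos:r]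
--     return A
-- ===== Notes on version B (the rewrite author's own statement) =====
-- stated objective: alternative
-- what changed: B first locates the insertion index with a scan that performs no writes (a next() over a reversed range), then moves the whole block with a single slice assignment, instead of A's interleaved compare-and-shift loop that writes one element per step.
-- outside the precondition, e.g. on Ins_Sort_rec([1, 2], 0, -1): A returns [1, 2], B returns [2, 1, 1, 2]
import Mathlib
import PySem

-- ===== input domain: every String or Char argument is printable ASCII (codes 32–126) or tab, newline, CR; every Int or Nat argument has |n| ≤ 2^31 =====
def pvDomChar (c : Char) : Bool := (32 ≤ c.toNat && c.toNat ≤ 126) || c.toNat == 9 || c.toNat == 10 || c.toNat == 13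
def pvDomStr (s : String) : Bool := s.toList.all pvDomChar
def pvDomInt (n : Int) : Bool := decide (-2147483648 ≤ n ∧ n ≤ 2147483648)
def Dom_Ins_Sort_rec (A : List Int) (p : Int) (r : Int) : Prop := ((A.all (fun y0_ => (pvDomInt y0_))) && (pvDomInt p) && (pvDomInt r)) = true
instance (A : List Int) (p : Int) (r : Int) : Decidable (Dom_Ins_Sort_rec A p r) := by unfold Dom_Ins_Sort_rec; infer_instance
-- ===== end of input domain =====

-- B locates the insertion index with a write-free scan and then does one block splice,
-- instead of A's interleaved compare-and-shift loop; equivalence is about the RETURN value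
-- (both Pythons also mutate A in place, ending in the same list state on Pre_).


-- ===== PORT A =====
-- while j>-1 and key < A[j]: A[j+1] = A[j]; j -= 1   — indexing via pyGetD/pySetD is exact
-- under Pre_ (all indices touched are in range there).
def insShiftLoop (key : Int) (L : List Int) (j : Int) : List Int :=
  if _h : -1 < j ∧ key < PySem.List.pyGetD L j 0 then
    insShiftLoop key (PySem.List.pySetD L (j + 1) (PySem.List.pyGetD L j 0)) (j - 1)
  else
    PySem.List.pySetD L (j + 1) key  -- A[j+1] = key
termination_by (j + 1).toNat
decreasing_by omega

def Ins_Sort_rec (A : List Int) (p : Int) (r : Int) : List Int :=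
  match PySem.List.pyGet? A r with
  | none => []                    -- key = A[r] raises IndexError (outside Pre_)
  | some key => insShiftLoop key A (r - 1)

-- ===== PORT B =====
-- next((i + 1 for i in range(r - 1, -1, -1) if A[i] <= key), 0)
def findPos (A : List Int) (key : Int) : List Int → Int
  | [] => 0
  | i :: rest =>
    if PySem.List.pyGetD A i 0 ≤ key then i + 1 else findPos A key rest

def Ins_Sort_rec_alt (A : List Int) (p : Int) (r : Int) : List Int :=
  match PySem.List.pyGet? A r with
  | none => []                    -- key = A[r] raises IndexError (outside Pre_)
  | some key =>
    let pos := findPos A key (PySem.List.pyRange (r - 1) (-1) (-1))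
    -- A[pos:r+1] = [key] + A[pos:r]
    PySem.List.slice A none (some pos) ++ (key :: PySem.List.slice A (some pos) (some r))
      ++ PySem.List.slice A (some (r + 1)) none

-- ===== PRECONDITION & SPEC =====
-- Pre_ restricts r to the natural domain of this insertion-sort inner step, 0 ≤ r < len(A):
-- for r < -len or r ≥ len both Pythons raise IndexError; for -len ≤ r < 0 (outside the
-- routine's natural domain) A's negative-index wraparound returns the list unchanged while
-- B's slice assignment grows it — see the cited example.
def Pre_Ins_Sort_rec (A : List Int) (p : Int) (r : Int) : Prop := 0 ≤ r ∧ r < A.length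
instance (A : List Int) (p : Int) (r : Int) : Decidable (Pre_Ins_Sort_rec A p r) := by unfold Pre_Ins_Sort_rec; infer_instance
def pvWitness_Ins_Sort_rec : List Int × Int × Int := ([3, 1, 2], 0, 2)

def Spec_Ins_Sort_rec (A : List Int) (p : Int) (r : Int) (out : List Int) : Prop := out = Ins_Sort_rec_alt A p r
instance (A : List Int) (p : Int) (r : Int) (out : List Int) : Decidable (Spec_Ins_Sort_rec A p r out) := by unfold Spec_Ins_Sort_rec; infer_instance

-- ===== CLAIM (what is proved, stated in full; the proofs are below) =====
def Claim_equal_Ins_Sort_rec : Prop := ∀ (A : List Int) (p : Int) (r : Int), Dom_Ins_Sort_rec A p r → Pre_Ins_Sort_rec A p r → Spec_Ins_Sort_rec A p r (Ins_Sort_rec A p r)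

-- ===== LEMMAS AND PROOFS =====

-- common characterisation of the insertion position: scan A[m-1], A[m-2], … for the first
-- element ≤ key; its index + 1 (or 0 if none)
def scanPos (A : List Int) (key : Int) : Nat → Nat
  | 0 => 0
  | m + 1 => if A.getD m 0 ≤ key then m + 1 else scanPos A key m

lemma findPos_eq_scanPos (A : List Int) (key : Int) (m : Nat) :
    findPos A key (PySem.List.pyRange ((m : Int) - 1) (-1) (-1)) = (scanPos A key m : Int) := by
  induction m with
  | zero =>
    rw [PySem.List.pyRange_neg_one_eq_nil (by omega)]
    simp [findPos, scanPos]
  | succ m ih =>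
    rw [show (((m + 1 : Nat) : Int) - 1) = (m : Int) by push_cast; omega,
        PySem.List.pyRange_neg_one_cons (by omega)]
    simp only [findPos, PySem.List.pyGetD_natCast, scanPos]
    split_ifs with h
    · push_cast; ring
    · exact ih

lemma set_at_front_len {α : Type} (xs : List α) (x v : α) (ys : List α) (k : Nat)
    (hk : k = xs.length) : (xs ++ x :: ys).set k v = xs ++ v :: ys := by
  subst hk
  induction xs with
  | nil => rfl
  | cons a xs ih => simp [ih]

lemma getD_at_take {m k : Nat} (A : List Int) (rest : List Int) (hk : k < m) (hm : m ≤ A.length) :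
    (A.take m ++ rest).getD k 0 = A.getD k 0 := by
  rw [List.getD, List.getD, List.getElem?_append_left (by simp; omega)]
  congr 1
  rw [List.getElem?_take_of_lt hk]

lemma insShiftLoop_eq (A : List Int) (key : Int) (n : Nat) (hn : n < A.length) :
    ∀ m : Nat, m ≤ n →
    insShiftLoop key (A.take m ++ A.getD m 0 :: ((A.drop m).take (n - m) ++ A.drop (n + 1)))
        ((m : Int) - 1)
      = A.take (scanPos A key m) ++ key ::
          ((A.drop (scanPos A key m)).take (n - scanPos A key m) ++ A.drop (n + 1)) := by
  intro m hm
  induction m with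
  | zero =>
    rw [insShiftLoop]
    simp only [scanPos]
    rw [dif_neg (by intro h; have := h.1; norm_num at this)]
    rw [show (((0 : Nat) : Int) - 1 + 1) = ((0 : Nat) : Int) by norm_num,
        PySem.List.pySetD_natCast]
    exact set_at_front_len (A.take 0) (A.getD 0 0) key _ 0 (by simp)
  | succ m ih =>
    have hmlen : m + 1 ≤ A.length := by omega
    have hjm : (((m + 1 : Nat) : Int) - 1) = ((m : Nat) : Int) := by push_cast; omega
    rw [insShiftLoop, hjm]
    have hget : PySem.List.pyGetD
        (A.take (m + 1) ++ A.getD (m + 1) 0 :: ((A.drop (m + 1)).take (n - (m + 1)) ++ A.drop (n + 1)))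
        ((m : Nat) : Int) 0 = A.getD m 0 := by
      rw [PySem.List.pyGetD_natCast]
      exact getD_at_take _ _ (by omega) hmlen
    by_cases hc : key < A.getD m 0
    · rw [dif_pos ⟨by omega, by rw [hget]; exact hc⟩]
      have hset : PySem.List.pySetD
          (A.take (m + 1) ++ A.getD (m + 1) 0 :: ((A.drop (m + 1)).take (n - (m + 1)) ++ A.drop (n + 1)))
          (((m : Nat) : Int) + 1)
          (PySem.List.pyGetD
            (A.take (m + 1) ++ A.getD (m + 1) 0 :: ((A.drop (m + 1)).take (n - (m + 1)) ++ A.drop (n + 1)))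
            ((m : Nat) : Int) 0)
          = A.take m ++ A.getD m 0 :: ((A.drop m).take (n - m) ++ A.drop (n + 1)) := by
        rw [hget, show (((m : Nat) : Int) + 1) = ((m + 1 : Nat) : Int) by push_cast; ring,
            PySem.List.pySetD_natCast]
        have hlen : (A.take (m + 1)).length = m + 1 := by simp; omega
        rw [set_at_front_len _ _ _ _ _ hlen.symm]
        -- take (m+1) = take m ++ [A[m]], and drop m = A[m] :: drop (m+1)
        have htk : A.take (m + 1) = A.take m ++ [A.getD m 0] := by
          rw [List.take_succ]
          congr 1
          rw [List.getD, List.getElem?_eq_getElem (by omega)]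
          rfl
        have hdr : (A.drop m).take (n - m) =
            A.getD m 0 :: (A.drop (m + 1)).take (n - (m + 1)) := by
          have : A.drop m = A.getD m 0 :: A.drop (m + 1) := by
            rw [List.getD, List.getElem?_eq_getElem (by omega)]
            exact (List.drop_eq_getElem_cons (by omega)).trans rfl
          rw [this, List.take_cons (by omega), Nat.sub_sub]
        rw [htk, hdr]
        simp
      rw [hset, show ((m : Nat) : Int) - 1 = ((m : Nat) : Int) - 1 from rfl]
      have := ih (by omega)
      rw [this]
      have hscan : scanPos A key (m + 1) = scanPos A key m := by
        simp only [scanPos]; rw [if_neg (by omega)]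
      rw [hscan]
    · rw [dif_neg (by intro h; rw [hget] at h; omega)]
      rw [show (((m : Nat) : Int) + 1) = ((m + 1 : Nat) : Int) by push_cast; ring,
          PySem.List.pySetD_natCast]
      have hlen : (A.take (m + 1)).length = m + 1 := by simp; omega
      rw [set_at_front_len _ _ _ _ _ hlen.symm]
      have hscan : scanPos A key (m + 1) = m + 1 := by
        simp only [scanPos]; rw [if_pos (by omega)]
      rw [hscan]

-- ===== VERDICT (by name: the statement is the Claim_ definition above) =====
theorem Ins_Sort_rec_spec : Claim_equal_Ins_Sort_rec := by
  intro A p r _hdom hpre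
  obtain ⟨hr0, hrlen⟩ := hpre
  unfold Spec_Ins_Sort_rec
  set n : Nat := r.toNat with hn
  have hrn : r = (n : Int) := by omega
  have hnlen : n < A.length := by omega
  have hget : PySem.List.pyGet? A r = some (A.getD n 0) := by
    rw [hrn, PySem.List.pyGet?_natCast, List.getD,
        List.getElem?_eq_getElem hnlen]
    rfl
  set key : Int := A.getD n 0 with hkey
  unfold Ins_Sort_rec Ins_Sort_rec_alt
  rw [hget]
  simp only
  -- A's side: A itself has the invariant shape at m = n
  have hA : A = A.take n ++ A.getD n 0 :: ((A.drop n).take (n - n) ++ A.drop (n + 1)) := by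
    have : A.drop n = A.getD n 0 :: A.drop (n + 1) := by
      rw [List.getD, List.getElem?_eq_getElem hnlen]
      exact (List.drop_eq_getElem_cons hnlen).trans rfl
    conv_lhs => rw [← List.take_append_drop n A, this]
    simp
  have hloop := insShiftLoop_eq A key n hnlen n le_rfl
  rw [hrn]
  conv_lhs => rw [hA]
  rw [hloop]
  -- B's side
  rw [show ((n : Int) - 1) = ((n : Int) - 1) from rfl, findPos_eq_scanPos A key n]
  set s : Nat := scanPos A key n with hs
  rw [PySem.List.slice_to_natCast, PySem.List.slice_natCast,
      show ((n : Int) + 1) = ((n + 1 : Nat) : Int) by push_cast; ring,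
      PySem.List.slice_from_natCast]
  simp
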